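-- pv_equiv track=rewrite | github.com/stevenlee168/stevenserver | app.py | add_laser_off
-- ===== SOURCE A (Python) =====
-- def add_laser_off(text):
--     lines = text.split("\n")
--     new_lines = []
--
--     for i in range(len(lines)):
--         new_lines.append(lines[i])  # luôn giữ dòng hiện tại
--
--         # Nếu dòng hiện tại là MoveL
--         if lines[i].strip().startswith("MoveL"):
--             # Kiểm tra điều kiện
--             if (
--                 i > 0 and lines[i - 1].strip().startswith("MoveL")  # dòng trước là MoveL
--                 and i + 1 < len(lines) and lines[i + 1].strip().startswith("MoveL")  # dòng sau là MoveL
--                 and i + 2 < len(lines) and lines[i + 2].strip().startswith("MoveJ")  # dòng sau nữa là MoveJ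
--             ):
--                 # Chèn Laser_Off
--                 new_lines.append('    <span class="highlight">Laser_Off;</span>')
--
--     return "\n".join(new_lines)
-- ===== SOURCE B (Python) =====
-- def add_laser_off(text):
--     # Backward streaming state machine: scan the lines in reverse, keeping only
--     # the tags of the three following lines as O(1) state; no index lookahead.
--     MARK = '    <span class="highlight">Laser_Off;</span>'
--
--     def tag(line):
--         s = line.strip()
--         if s.startswith("MoveL"):
--             return 'L'
--         if s.startswith("MoveJ"):
--             return 'J'
--         return '.'
--
--     rev = []
--     pending = None
--     t1 = t2 = t3 = '.'
--     for line in reversed(text.split("\n")):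
--         t0 = tag(line)
--         if pending is not None:
--             if t0 == 'L' and t1 == 'L' and t2 == 'L' and t3 == 'J':
--                 rev.append(MARK)
--             rev.append(pending)
--         pending, t1, t2, t3 = line, t0, t1, t2
--     if pending is not None:
--         rev.append(pending)
--     return "\n".join(reversed(rev))
-- ===== Notes on version B (the rewrite author's own statement) =====
-- stated objective: alternative
-- what changed: Replaced A's forward index loop with random-access lookahead (lines[i-1], lines[i+1], lines[i+2] re-stripped inside nested ifs) by a backward streaming state machine: the lines are scanned in reverse once, each line is tagged once, only the tags of the three following lines are kept as O(1) state, the output is built back-to-front and reversed at the end.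
import Mathlib
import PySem

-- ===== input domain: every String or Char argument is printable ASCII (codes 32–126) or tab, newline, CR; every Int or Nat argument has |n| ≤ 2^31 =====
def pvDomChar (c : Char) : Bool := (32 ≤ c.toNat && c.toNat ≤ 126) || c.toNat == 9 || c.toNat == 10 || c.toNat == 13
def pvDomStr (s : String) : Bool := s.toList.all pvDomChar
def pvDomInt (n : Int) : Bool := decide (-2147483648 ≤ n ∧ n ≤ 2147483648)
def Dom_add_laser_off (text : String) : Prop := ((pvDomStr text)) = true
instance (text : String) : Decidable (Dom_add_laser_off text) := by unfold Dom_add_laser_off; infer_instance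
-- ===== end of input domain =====

-- B replaces A's forward index loop with random-access lookahead by a backward streaming
-- state machine that keeps only the tags of the three following lines as O(1) state
-- (alternative decomposition, same cost).

def laserMark : String := "    <span class=\"highlight\">Laser_Off;</span>"

-- ===== PORT A =====
def add_laser_off (text : String) : String :=
  let lines := (PySem.Str.split? text "\n").getD []
  let n : Int := lines.length
  let new_lines := (PySem.List.pyRange 0 n 1).foldl (fun acc i =>
    let acc := acc ++ [PySem.List.pyGetD lines i ""]   -- lines[i], in range for i ∈ range(n)
    if PySem.Str.startswith (PySem.Str.strip (PySem.List.pyGetD lines i "")) "MoveL" then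
      if decide (0 < i) && PySem.Str.startswith (PySem.Str.strip (PySem.List.pyGetD lines (i-1) "")) "MoveL"
          && decide (i+1 < n) && PySem.Str.startswith (PySem.Str.strip (PySem.List.pyGetD lines (i+1) "")) "MoveL"
          && decide (i+2 < n) && PySem.Str.startswith (PySem.Str.strip (PySem.List.pyGetD lines (i+2) "")) "MoveJ"
      then acc ++ [laserMark]
      else acc
    else acc) []
  PySem.Str.join "\n" new_lines

-- ===== PORT B =====
-- tag of a line: 'L' / 'J' / '.', as in Source B
def pvTag (line : String) : Char :=
  let s := PySem.Str.strip line
  if PySem.Str.startswith s "MoveL" then 'L'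
  else if PySem.Str.startswith s "MoveJ" then 'J'
  else '.'

-- one step of Source B's reverse loop; state = (rev, pending, t1, t2, t3)
def pvStep (st : List String × Option String × Char × Char × Char) (line : String) :
    List String × Option String × Char × Char × Char :=
  let (rev, pending, t1, t2, t3) := st
  let t0 := pvTag line
  let rev := match pending with
    | none => rev
    | some p =>
      (if t0 == 'L' && t1 == 'L' && t2 == 'L' && t3 == 'J' then rev ++ [laserMark] else rev) ++ [p]
  (rev, some line, t0, t1, t2)

def add_laser_off_alt (text : String) : String :=
  let lines := (PySem.Str.split? text "\n").getD []
  let st := lines.reverse.foldl pvStep ([], none, '.', '.', '.')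
  let rev := match st.2.1 with
    | none => st.1
    | some p => st.1 ++ [p]
  PySem.Str.join "\n" rev.reverse

-- ===== PRECONDITION & SPEC =====
def Spec_add_laser_off (text : String) (out : String) : Prop := out = add_laser_off_alt text
instance (text : String) (out : String) : Decidable (Spec_add_laser_off text out) := by unfold Spec_add_laser_off; infer_instance

-- ===== CLAIM (what is proved, stated in full; the proofs are below) =====
def Claim_equal_add_laser_off : Prop := ∀ (text : String), Dom_add_laser_off text → Spec_add_laser_off text (add_laser_off text)

-- ===== LEMMAS AND PROOFS =====

def pvIsL (s : String) : Bool := PySem.Str.startswith (PySem.Str.strip s) "MoveL"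
def pvIsJ (s : String) : Bool := PySem.Str.startswith (PySem.Str.strip s) "MoveJ"

-- lookahead condition on the two lines after the current one
def pvLook : List String → Bool
  | z1 :: z2 :: _ => pvIsL z1 && pvIsJ z2
  | _ => false

-- the common structural specification: p = "previous line is MoveL"
def pvS : Bool → List String → List String
  | _, [] => []
  | p, x :: xs => x :: ((if p && pvIsL x && pvLook xs then [laserMark] else []) ++ pvS (pvIsL x) xs)

theorem pvTag_eq (z : String) :
    pvTag z = (if PySem.Str.startswith (PySem.Str.strip z) "MoveL" then 'L'
               else if PySem.Str.startswith (PySem.Str.strip z) "MoveJ" then 'J' else '.') := rfl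

-- a stripped line cannot start with both "MoveL" and "MoveJ"
theorem pvLJ_disjoint (z : String) (h : pvIsL z = true) : pvIsJ z = false := by
  by_contra hJ
  rw [Bool.not_eq_false] at hJ
  unfold pvIsL at h
  unfold pvIsJ at hJ
  rw [PySem.Str.startswith_eq] at h hJ
  have hL' := (PySem.Chars.startswith_iff _ _).mp h
  have hJ' := (PySem.Chars.startswith_iff _ _).mp hJ
  have := (List.prefix_of_prefix_length_le hL' hJ' (by decide)).eq_of_length (by decide)
  exact absurd this (by decide)

theorem pvTagL (z : String) : (pvTag z == 'L') = pvIsL z := by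
  rw [pvTag_eq]
  unfold pvIsL
  split_ifs with h1 h2 <;> simp_all

theorem pvTagJ (z : String) : (pvTag z == 'J') = pvIsJ z := by
  rw [pvTag_eq]
  unfold pvIsJ
  split_ifs with h1 h2
  · have := pvLJ_disjoint z h1
    unfold pvIsJ at this
    simpa using this
  · simpa using h2
  · simpa using h2

-- ---------- B = pvS ----------

def pvTg1 : List String → Char
  | z :: _ => pvTag z
  | [] => '.'

def pvTg2 : List String → Char
  | _ :: z :: _ => pvTag z
  | _ => '.'

def pvStateFor : List String → (List String × Option String × Char × Char × Char)
  | [] => ([], none, '.', '.', '.')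
  | y :: ys => ((pvS (pvIsL y) ys).reverse, some y, pvTag y, pvTg1 ys, pvTg2 ys)

theorem pvLook_eq (ys : List String) :
    ((pvTg1 ys == 'L') && (pvTg2 ys == 'J')) = pvLook ys := by
  match ys with
  | [] => simp [pvTg1, pvTg2, pvLook]
  | [z] => simp [pvTg1, pvTg2, pvLook]
  | z1 :: z2 :: zs => simp [pvTg1, pvTg2, pvLook, pvTagL, pvTagJ]

theorem pvTg2_cons (y : String) (ys : List String) : pvTg2 (y :: ys) = pvTg1 ys := by
  cases ys <;> rfl

theorem pvMachine_inv (xs : List String) :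
    xs.reverse.foldl pvStep ([], none, '.', '.', '.') = pvStateFor xs := by
  induction xs with
  | nil => rfl
  | cons x xs ih =>
    rw [List.reverse_cons, List.foldl_append, ih, List.foldl_cons, List.foldl_nil]
    match xs with
    | [] => simp [pvStateFor, pvStep, pvS, pvTg1, pvTg2]
    | y :: ys =>
      have hc : ((pvTag x == 'L') && (pvTag y == 'L') && (pvTg1 ys == 'L') && (pvTg2 ys == 'J'))
          = (pvIsL x && pvIsL y && pvLook ys) := by
        rw [pvTagL, pvTagL, ← pvLook_eq]
        simp [Bool.and_assoc]
      have hR : pvStateFor (x :: y :: ys)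
          = ((pvS (pvIsL x) (y :: ys)).reverse, some x, pvTag x, pvTag y, pvTg1 ys) := by
        show ((pvS (pvIsL x) (y :: ys)).reverse, some x, pvTag x, pvTg1 (y :: ys), pvTg2 (y :: ys)) = _
        rw [pvTg2_cons]
        rfl
      rw [hR]
      show ((if (pvTag x == 'L') && (pvTag y == 'L') && (pvTg1 ys == 'L') && (pvTg2 ys == 'J')
            then (pvS (pvIsL y) ys).reverse ++ [laserMark] else (pvS (pvIsL y) ys).reverse) ++ [y],
            some x, pvTag x, pvTag y, pvTg1 ys)
          = ((pvS (pvIsL x) (y :: ys)).reverse, some x, pvTag x, pvTag y, pvTg1 ys)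
      refine congrArg (fun r => (r, some x, pvTag x, pvTag y, pvTg1 ys)) ?_
      rw [hc]
      cases h : (pvIsL x && pvIsL y && pvLook ys) <;> simp [pvS, h]

theorem pvB_eq_S (lines : List String) :
    (let st := lines.reverse.foldl pvStep ([], none, '.', '.', '.')
     let rev := match st.2.1 with
       | none => st.1
       | some p => st.1 ++ [p]
     rev.reverse) = pvS false lines := by
  rw [pvMachine_inv]
  match lines with
  | [] => rfl
  | y :: ys => simp [pvStateFor, pvS]

-- ---------- A = pvS ----------

-- A's window condition, Nat-indexed, with the "previous line" at index 0 generalized to p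
def pvCondG (p : Bool) (lines : List String) (k : Nat) : Bool :=
  pvIsL (lines.getD k "") &&
  ((if k = 0 then p else pvIsL (lines.getD (k-1) "")) &&
   decide (k+1 < lines.length) && pvIsL (lines.getD (k+1) "") &&
   decide (k+2 < lines.length) && pvIsJ (lines.getD (k+2) ""))

theorem pvCondG_zero (p : Bool) (x : String) (xs : List String) :
    pvCondG p (x :: xs) 0 = (p && pvIsL x && pvLook xs) := by
  match xs with
  | [] => simp [pvCondG, pvLook]
  | [z] => simp [pvCondG, pvLook]
  | z1 :: z2 :: zs =>
    simp [pvCondG, pvLook]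
    cases p <;> cases hx : pvIsL x <;> cases h1 : pvIsL z1 <;> cases h2 : pvIsJ z2 <;>
      simp [hx, h1, h2]

theorem pvCondG_succ (p : Bool) (x : String) (xs : List String) (k : Nat) :
    pvCondG p (x :: xs) (k+1) = pvCondG (pvIsL x) xs k := by
  unfold pvCondG
  have h1 : (x :: xs).getD (k+1) "" = xs.getD k "" := rfl
  have h2 : (x :: xs).getD (k+1+1) "" = xs.getD (k+1) "" := rfl
  have h3 : (x :: xs).getD (k+1+2) "" = xs.getD (k+2) "" := rfl
  have h4 : (if k+1 = 0 then p else pvIsL ((x :: xs).getD (k+1-1) ""))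
      = (if k = 0 then pvIsL x else pvIsL (xs.getD (k-1) "")) := by
    cases k with
    | zero => simp
    | succ m => simp
  have h5 : decide (k+1+1 < (x :: xs).length) = decide (k+1 < xs.length) := by
    simp only [List.length_cons]; exact decide_eq_decide.mpr (by omega)
  have h6 : decide (k+1+2 < (x :: xs).length) = decide (k+2 < xs.length) := by
    simp only [List.length_cons]; exact decide_eq_decide.mpr (by omega)
  rw [h1, h2, h3, h4, h5, h6]

theorem pvKey (lines : List String) (p : Bool) :
    (List.range lines.length).flatMap
      (fun k => lines.getD k "" :: (if pvCondG p lines k then [laserMark] else []))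
    = pvS p lines := by
  induction lines generalizing p with
  | nil => rfl
  | cons x xs ih =>
    rw [show (x :: xs).length = xs.length + 1 from rfl, List.range_succ_eq_map,
        List.flatMap_cons, List.flatMap_map]
    show (x :: xs).getD 0 "" :: (if pvCondG p (x :: xs) 0 then [laserMark] else [])
        ++ (List.range xs.length).flatMap
            (fun k => (x :: xs).getD (k+1) "" :: (if pvCondG p (x :: xs) (k+1) then [laserMark] else []))
        = pvS p (x :: xs)
    have hfun : (fun k => (x :: xs).getD (k+1) "" :: (if pvCondG p (x :: xs) (k+1) then [laserMark] else []))
        = (fun k => xs.getD k "" :: (if pvCondG (pvIsL x) xs k then [laserMark] else [])) := by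
      funext k
      rw [pvCondG_succ]
      rfl
    rw [hfun, ih, pvCondG_zero, List.getD_cons_zero]
    rfl

-- A's foldl over pyRange equals the Nat flatMap form
set_option maxHeartbeats 2000000 in
theorem pvA_eq_flatMap (lines : List String) :
    ((PySem.List.pyRange 0 (lines.length : Int) 1).foldl (fun acc i =>
      let acc := acc ++ [PySem.List.pyGetD lines i ""]
      if PySem.Str.startswith (PySem.Str.strip (PySem.List.pyGetD lines i "")) "MoveL" then
        if decide (0 < i) && PySem.Str.startswith (PySem.Str.strip (PySem.List.pyGetD lines (i-1) "")) "MoveL"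
            && decide (i+1 < (lines.length : Int)) && PySem.Str.startswith (PySem.Str.strip (PySem.List.pyGetD lines (i+1) "")) "MoveL"
            && decide (i+2 < (lines.length : Int)) && PySem.Str.startswith (PySem.Str.strip (PySem.List.pyGetD lines (i+2) "")) "MoveJ"
        then acc ++ [laserMark]
        else acc
      else acc) [])
    = (List.range lines.length).flatMap
        (fun k => lines.getD k "" :: (if pvCondG false lines k then [laserMark] else [])) := by
  have hA : (fun (acc : List String) (i : Int) =>
      let acc := acc ++ [PySem.List.pyGetD lines i ""]
      if PySem.Str.startswith (PySem.Str.strip (PySem.List.pyGetD lines i "")) "MoveL" then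
        if decide (0 < i) && PySem.Str.startswith (PySem.Str.strip (PySem.List.pyGetD lines (i-1) "")) "MoveL"
            && decide (i+1 < (lines.length : Int)) && PySem.Str.startswith (PySem.Str.strip (PySem.List.pyGetD lines (i+1) "")) "MoveL"
            && decide (i+2 < (lines.length : Int)) && PySem.Str.startswith (PySem.Str.strip (PySem.List.pyGetD lines (i+2) "")) "MoveJ"
        then acc ++ [laserMark]
        else acc
      else acc)
      = fun acc i => acc ++ (PySem.List.pyGetD lines i "" ::
          (if PySem.Str.startswith (PySem.Str.strip (PySem.List.pyGetD lines i "")) "MoveL"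
              && (decide (0 < i) && PySem.Str.startswith (PySem.Str.strip (PySem.List.pyGetD lines (i-1) "")) "MoveL"
                  && decide (i+1 < (lines.length : Int)) && PySem.Str.startswith (PySem.Str.strip (PySem.List.pyGetD lines (i+1) "")) "MoveL"
                  && decide (i+2 < (lines.length : Int)) && PySem.Str.startswith (PySem.Str.strip (PySem.List.pyGetD lines (i+2) "")) "MoveJ")
           then [laserMark] else [])) := by
    funext acc i
    split_ifs with h1 h2 <;> simp_all
  rw [hA, PySem.List.foldl_append_eq_flatMap, PySem.List.pyRange_one, List.flatMap_map]
  simp only [Int.sub_zero, Int.toNat_natCast, List.nil_append, Int.zero_add]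
  apply List.flatMap_congr
  intro k hk
  rw [List.mem_range] at hk
  rw [PySem.List.pyGetD_natCast]
  refine congrArg (lines.getD k "" :: ·) ?_
  refine congrArg (fun b : Bool => if b then [laserMark] else ([] : List String)) ?_
  cases k with
  | zero =>
    simp [pvCondG]
  | succ m =>
    have e1 : ((m+1 : Nat) : Int) - 1 = ((m : Nat) : Int) := by push_cast; ring
    have e2 : ((m+1 : Nat) : Int) + 1 = ((m+2 : Nat) : Int) := by push_cast; ring
    have e3 : ((m+1 : Nat) : Int) + 2 = ((m+3 : Nat) : Int) := by push_cast; ring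
    rw [e1, e2, e3, PySem.List.pyGetD_natCast, PySem.List.pyGetD_natCast, PySem.List.pyGetD_natCast]
    have g0 : decide ((0:Int) < ((m+1 : Nat) : Int)) = true := by
      rw [decide_eq_true_eq]; exact_mod_cast Nat.succ_pos m
    have g1 : decide (((m+2 : Nat) : Int) < (lines.length : Int)) = decide (m+1+1 < lines.length) :=
      decide_eq_decide.mpr (by exact_mod_cast Iff.rfl)
    have g2 : decide (((m+3 : Nat) : Int) < (lines.length : Int)) = decide (m+1+2 < lines.length) :=
      decide_eq_decide.mpr (by exact_mod_cast Iff.rfl)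
    rw [g0, g1, g2]
    simp [pvCondG, pvIsL, pvIsJ]

-- ===== VERDICT (by name: the statement is the Claim_ definition above) =====
theorem add_laser_off_spec : Claim_equal_add_laser_off := by
  intro text _
  unfold Spec_add_laser_off add_laser_off add_laser_off_alt
  exact congrArg (PySem.Str.join "\n")
    (((pvA_eq_flatMap ((PySem.Str.split? text "\n").getD [])).trans
      (pvKey ((PySem.Str.split? text "\n").getD []) false)).trans
      (pvB_eq_S ((PySem.Str.split? text "\n").getD [])).symm)
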